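-- pv_equiv track=rewrite | github.com/erimcakir123/polymarket-agent | _tmp_sport_and_exits.py | sport
-- ===== SOURCE A (Python) =====
-- def sport(tag, slug=""):
--     s = (tag or "").lower() + " " + (slug or "").lower()
--     if "nba" in s: return "NBA"
--     if "nhl" in s: return "NHL"
--     if "mlb" in s: return "MLB"
--     if "atp" in s: return "ATP"
--     if "wta" in s: return "WTA"
--     if "boxing" in s: return "Boxing"
--     if "mma" in s or "ufc" in s: return "MMA"
--     if "euroleague" in s: return "EuroLeague"
--     if any(x in s for x in ["sud","lib","aus","fl1","fl2","fr1","fr2","ligue","bl1","bl2","bun",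
--                              "elc","epl","ere","sea","tur","den","ita","esp","por","ned","mls",
--                              "serie","la-liga","premier","primera","a-league","bundes","eredivisie"]):
--         return "Soccer"
--     return "other"
-- ===== SOURCE B (Python) =====
-- _KW = [("nba", "NBA"), ("nhl", "NHL"), ("mlb", "MLB"), ("atp", "ATP"),
--        ("wta", "WTA"), ("boxing", "Boxing"), ("mma", "MMA"), ("ufc", "MMA"),
--        ("euroleague", "EuroLeague")] + \
--       [(kw, "Soccer") for kw in
--        ["sud","lib","aus","fl1","fl2","fr1","fr2","ligue","bl1","bl2","bun",
--         "elc","epl","ere","sea","tur","den","ita","esp","por","ned","mls",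
--         "serie","la-liga","premier","primera","a-league","bundes","eredivisie"]]
--
-- _PRIORITY = ["NBA", "NHL", "MLB", "ATP", "WTA", "Boxing", "MMA", "EuroLeague", "Soccer"]
--
-- def sport(tag, slug=""):
--     # Stage 1: one sweep over the positions of s, collecting the set of all
--     # labels whose keyword starts at some position.  Stage 2: resolve by the
--     # fixed priority list.  (No per-keyword substring search.)
--     s = (tag or "").lower() + " " + (slug or "").lower()
--     found = set()
--     for i in range(len(s)):
--         for kw, label in _KW:
--             if s.startswith(kw, i):
--                 found.add(label)
--     for label in _PRIORITY:
--         if label in found: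
--             return label
--     return "other"
-- ===== Notes on version B (the rewrite author's own statement) =====
-- stated objective: alternative
-- what changed: Instead of searching the string once per keyword in a cascade of if-returns, B makes one sweep over the positions of the combined lowercased string collecting the set of labels whose keyword starts at some position, then resolves that set against a fixed priority list.
import Mathlib
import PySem

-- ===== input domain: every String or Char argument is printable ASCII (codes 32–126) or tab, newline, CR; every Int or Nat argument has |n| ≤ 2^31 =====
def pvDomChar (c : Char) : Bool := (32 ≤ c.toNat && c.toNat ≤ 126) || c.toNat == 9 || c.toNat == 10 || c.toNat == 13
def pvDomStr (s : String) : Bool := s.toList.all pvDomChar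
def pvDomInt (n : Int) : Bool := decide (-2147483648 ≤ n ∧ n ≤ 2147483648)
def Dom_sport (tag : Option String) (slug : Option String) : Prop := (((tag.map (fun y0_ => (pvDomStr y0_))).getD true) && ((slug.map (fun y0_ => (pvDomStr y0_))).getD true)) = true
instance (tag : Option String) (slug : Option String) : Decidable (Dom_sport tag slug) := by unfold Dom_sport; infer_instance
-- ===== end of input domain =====

-- B replaces A's per-keyword substring cascade by one sweep over the string's positions that collects the set of matched labels, then resolves by a fixed priority list (objective: alternative).


-- ===== PORT A =====
def sport (tag : Option String) (slug : Option String) : String :=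
  let s : List Char :=
    PySem.Chars.lower (tag.getD "").toList ++ " ".toList ++ PySem.Chars.lower (slug.getD "").toList
  if PySem.Chars.isIn "nba".toList s then "NBA" else
  if PySem.Chars.isIn "nhl".toList s then "NHL" else
  if PySem.Chars.isIn "mlb".toList s then "MLB" else
  if PySem.Chars.isIn "atp".toList s then "ATP" else
  if PySem.Chars.isIn "wta".toList s then "WTA" else
  if PySem.Chars.isIn "boxing".toList s then "Boxing" else
  if PySem.Chars.isIn "mma".toList s || PySem.Chars.isIn "ufc".toList s then "MMA" else
  if PySem.Chars.isIn "euroleague".toList s then "EuroLeague" else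
  if (["sud","lib","aus","fl1","fl2","fr1","fr2","ligue","bl1","bl2","bun",
       "elc","epl","ere","sea","tur","den","ita","esp","por","ned","mls",
       "serie","la-liga","premier","primera","a-league","bundes","eredivisie"].map String.toList).any
      (fun x => PySem.Chars.isIn x s) then "Soccer" else
  "other"

-- ===== PORT B =====
-- B's keyword→label association (mirrors _KW in Source B)
def kwTable : List (String × String) :=
  [("nba", "NBA"), ("nhl", "NHL"), ("mlb", "MLB"), ("atp", "ATP"),
   ("wta", "WTA"), ("boxing", "Boxing"), ("mma", "MMA"), ("ufc", "MMA"),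
   ("euroleague", "EuroLeague")]
  ++ (["sud","lib","aus","fl1","fl2","fr1","fr2","ligue","bl1","bl2","bun",
       "elc","epl","ere","sea","tur","den","ita","esp","por","ned","mls",
       "serie","la-liga","premier","primera","a-league","bundes","eredivisie"].map
       (fun kw => (kw, "Soccer")))

-- B's priority list (mirrors _PRIORITY in Source B)
def prioList : List String :=
  ["NBA", "NHL", "MLB", "ATP", "WTA", "Boxing", "MMA", "EuroLeague", "Soccer"]

-- stage 1: 'for i in range(len(s)): for kw, label in _KW: if s.startswith(kw, i): found.add(label)'
def foundLabels (s : List Char) : PySem.Set String :=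
  (List.range s.length).foldl
    (fun acc i =>
      kwTable.foldl
        (fun acc2 p =>
          if PySem.Chars.startswith (s.drop i) p.1.toList then PySem.Set.add acc2 p.2 else acc2)
        acc)
    PySem.Set.empty

-- stage 2: 'for label in _PRIORITY: if label in found: return label' / 'return "other"'
def pickLabel : List String → PySem.Set String → String
  | [], _ => "other"
  | l :: rest, f => if PySem.Set.contains f l then l else pickLabel rest f

def sport_alt (tag : Option String) (slug : Option String) : String :=
  let s : List Char :=
    PySem.Chars.lower (tag.getD "").toList ++ " ".toList ++ PySem.Chars.lower (slug.getD "").toList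
  pickLabel prioList (foundLabels s)

-- ===== PRECONDITION & SPEC =====
def Spec_sport (tag : Option String) (slug : Option String) (out : String) : Prop := out = sport_alt tag slug
instance (tag : Option String) (slug : Option String) (out : String) : Decidable (Spec_sport tag slug out) := by unfold Spec_sport; infer_instance

-- ===== CLAIM (what is proved, stated in full; the proofs are below) =====
def Claim_equal_sport : Prop := ∀ (tag : Option String) (slug : Option String), Dom_sport tag slug → Spec_sport tag slug (sport tag slug)

-- ===== LEMMAS AND PROOFS =====
-- membership after the inner fold over the keyword table
theorem mem_inner (xs : List (String × String)) (t : List Char) (acc : PySem.Set String) (l : String) :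
    l ∈ xs.foldl
        (fun acc2 p =>
          if PySem.Chars.startswith t p.1.toList then PySem.Set.add acc2 p.2 else acc2) acc ↔
      l ∈ acc ∨ ∃ p ∈ xs, PySem.Chars.startswith t p.1.toList = true ∧ p.2 = l := by
  induction xs generalizing acc with
  | nil => simp
  | cons p rest ih =>
      simp only [List.foldl_cons, List.mem_cons]
      by_cases h : PySem.Chars.startswith t p.1.toList = true
      · rw [if_pos h]
        rw [ih]
        simp only [PySem.Set.mem_add]
        constructor
        · rintro ((hm | rfl) | ⟨q, hq, hx⟩)
          · exact Or.inl hm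
          · exact Or.inr ⟨p, Or.inl rfl, h, rfl⟩
          · exact Or.inr ⟨q, Or.inr hq, hx⟩
        · rintro (hm | ⟨q, (rfl | hq), hx, he⟩)
          · exact Or.inl (Or.inl hm)
          · exact Or.inl (Or.inr he.symm)
          · exact Or.inr ⟨q, hq, hx, he⟩
      · rw [if_neg h]
        rw [ih]
        constructor
        · rintro (hm | ⟨q, hq, hx⟩)
          · exact Or.inl hm
          · exact Or.inr ⟨q, Or.inr hq, hx⟩
        · rintro (hm | ⟨q, (rfl | hq), hx, he⟩)
          · exact Or.inl hm
          · exact absurd hx h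
          · exact Or.inr ⟨q, hq, hx, he⟩

-- membership after the outer fold over the positions
theorem mem_outer (is : List Nat) (s : List Char) (acc : PySem.Set String) (l : String) :
    l ∈ is.foldl
        (fun acc i =>
          kwTable.foldl
            (fun acc2 p =>
              if PySem.Chars.startswith (s.drop i) p.1.toList then PySem.Set.add acc2 p.2 else acc2)
            acc) acc ↔
      l ∈ acc ∨ ∃ i ∈ is, ∃ p ∈ kwTable, PySem.Chars.startswith (s.drop i) p.1.toList = true ∧ p.2 = l := by
  induction is generalizing acc with
  | nil => simp
  | cons i rest ih =>
      simp only [List.foldl_cons, List.mem_cons, ih, mem_inner]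
      constructor
      · rintro ((h | ⟨p, hp, hst, he⟩) | ⟨j, hj, hx⟩)
        · exact Or.inl h
        · exact Or.inr ⟨i, Or.inl rfl, p, hp, hst, he⟩
        · exact Or.inr ⟨j, Or.inr hj, hx⟩
      · rintro (h | ⟨j, (rfl | hj), hx⟩)
        · exact Or.inl (Or.inl h)
        · exact Or.inl (Or.inr hx)
        · exact Or.inr ⟨j, hj, hx⟩

-- ∃ position where a nonempty keyword starts  ↔  Python's 'kw in s'
theorem exists_start_iff_isIn (kw s : List Char) (hkw : kw ≠ []) :
    (∃ i ∈ List.range s.length, PySem.Chars.startswith (s.drop i) kw = true) ↔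
      PySem.Chars.isIn kw s = true := by
  rw [← PySem.Chars.exists_prefix_drop_iff_isIn]
  constructor
  · rintro ⟨i, _, h⟩
    exact ⟨i, (PySem.Chars.startswith_iff _ _).mp h⟩
  · rintro ⟨j, h⟩
    refine ⟨j, ?_, (PySem.Chars.startswith_iff _ _).mpr h⟩
    rw [List.mem_range]
    by_contra hj
    push Not at hj
    rw [List.drop_eq_nil_of_le hj] at h
    exact hkw (List.prefix_nil.mp h)

-- every keyword in the table is nonempty
theorem kwTable_ne (p : String × String) (hp : p ∈ kwTable) : p.1.toList ≠ [] := by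
  revert hp; unfold kwTable; intro hp; fin_cases hp <;> simp

-- what 'label in found' computes, for any label
theorem contains_foundLabels (s : List Char) (l : String) :
    PySem.Set.contains (foundLabels s) l =
      decide (∃ p ∈ kwTable, PySem.Chars.isIn p.1.toList s = true ∧ p.2 = l) := by
  have hmem : l ∈ foundLabels s ↔ ∃ p ∈ kwTable, PySem.Chars.isIn p.1.toList s = true ∧ p.2 = l := by
    rw [foundLabels, mem_outer]
    simp only [PySem.Set.empty, List.not_mem_nil, false_or]
    constructor
    · rintro ⟨i, hi, p, hp, hst, he⟩
      exact ⟨p, hp, (exists_start_iff_isIn p.1.toList s (kwTable_ne p hp)).mp ⟨i, hi, hst⟩, he⟩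
    · rintro ⟨p, hp, hin, he⟩
      obtain ⟨i, hi, hst⟩ := (exists_start_iff_isIn p.1.toList s (kwTable_ne p hp)).mpr hin
      exact ⟨i, hi, p, hp, hst, he⟩
  by_cases hx : ∃ p ∈ kwTable, PySem.Chars.isIn p.1.toList s = true ∧ p.2 = l
  · rw [decide_eq_true hx]
    exact (PySem.Set.contains_iff _ _).mpr (hmem.mpr hx)
  · rw [decide_eq_false hx]
    exact Bool.eq_false_iff.mpr (fun hc => hx (hmem.mp ((PySem.Set.contains_iff _ _).mp hc)))

-- the two programs agree on any combined string s
theorem main_eq (s : List Char) :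
    (if PySem.Chars.isIn "nba".toList s then "NBA" else
     if PySem.Chars.isIn "nhl".toList s then "NHL" else
     if PySem.Chars.isIn "mlb".toList s then "MLB" else
     if PySem.Chars.isIn "atp".toList s then "ATP" else
     if PySem.Chars.isIn "wta".toList s then "WTA" else
     if PySem.Chars.isIn "boxing".toList s then "Boxing" else
     if PySem.Chars.isIn "mma".toList s || PySem.Chars.isIn "ufc".toList s then "MMA" else
     if PySem.Chars.isIn "euroleague".toList s then "EuroLeague" else
     if (["sud","lib","aus","fl1","fl2","fr1","fr2","ligue","bl1","bl2","bun",
          "elc","epl","ere","sea","tur","den","ita","esp","por","ned","mls",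
          "serie","la-liga","premier","primera","a-league","bundes","eredivisie"].map String.toList).any
         (fun x => PySem.Chars.isIn x s) then "Soccer" else
     "other") = pickLabel prioList (foundLabels s) := by
  simp only [prioList, pickLabel]
  simp only [contains_foundLabels]
  simp [kwTable, Bool.or_eq_true]

-- ===== VERDICT (by name: the statement is the Claim_ definition above) =====
theorem sport_spec : Claim_equal_sport := by
  intro tag slug _
  show sport tag slug = sport_alt tag slug
  unfold sport sport_alt
  exact main_eq _
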